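-- pv_equiv track=rewrite | github.com/JordanSerafini/Aura | agents/memory/memory_consolidator.py | _find_common_pattern
-- ===== SOURCE A (Python) =====
-- def _find_common_pattern(texts: list[str]) -> str:
--     """Trouve le pattern commun dans une liste de textes."""
--     if not texts:
--         return ""
--
--     # Tokenizer simple
--     word_sets = [set(t.lower().split()) for t in texts]
--
--     # Intersection des mots
--     common_words = word_sets[0]
--     for ws in word_sets[1:]:
--         common_words &= ws
--
--     # Prendre le premier texte et garder seulement les mots communs
--     first_words = texts[0].split()
--     pattern = " ".join(w for w in first_words if w.lower() in common_words)
--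
--     return pattern if pattern else texts[0][:100]
-- ===== SOURCE B (Python) =====
-- def _find_common_pattern(texts: list[str]) -> str:
--     """Direct check: keep each word of the first text whose lowercase occurs as a
--     token of every text. No intermediate sets or intersections are built."""
--     if not texts:
--         return ""
--
--     pattern = " ".join(
--         w for w in texts[0].split()
--         if all(w.lower() in t.lower().split() for t in texts)
--     )
--
--     return pattern if pattern else texts[0][:100]
-- ===== Notes on version B (the rewrite author's own statement) =====
-- stated objective: simpler
-- what changed: B builds no word sets and no intersection at all: it filters the first text's words by directly checking, with a short-circuiting all(), that each word's lowercase occurs as a token of every text.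
import Mathlib
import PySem

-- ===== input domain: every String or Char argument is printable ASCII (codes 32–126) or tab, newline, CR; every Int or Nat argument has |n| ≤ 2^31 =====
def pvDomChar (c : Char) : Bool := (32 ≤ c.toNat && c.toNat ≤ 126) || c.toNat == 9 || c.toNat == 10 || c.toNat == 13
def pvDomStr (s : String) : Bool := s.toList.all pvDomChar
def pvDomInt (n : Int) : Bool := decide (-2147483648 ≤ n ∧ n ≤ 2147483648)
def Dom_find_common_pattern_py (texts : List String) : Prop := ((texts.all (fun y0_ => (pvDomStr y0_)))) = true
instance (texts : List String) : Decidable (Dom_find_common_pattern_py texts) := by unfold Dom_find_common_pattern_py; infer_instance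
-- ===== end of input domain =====

-- B is simpler: it builds no word sets and no intersection, filtering the first text's words by a direct all-texts membership check.

-- ===== PORT A =====
def find_common_pattern_py (texts : List String) : String :=
  match texts with
  | [] => ""
  | t0 :: _ =>
    let word_sets : List (PySem.Set String) :=
      texts.map (fun t => PySem.Set.ofList (PySem.Str.split₀ (PySem.Str.lower t)))
    let common_words : PySem.Set String :=
      (word_sets.drop 1).foldl (fun acc ws => PySem.Set.inter acc ws) (word_sets.headD PySem.Set.empty)
    let first_words := PySem.Str.split₀ t0
    let pattern := PySem.Str.join " "
      (first_words.filter (fun w => PySem.Set.contains common_words (PySem.Str.lower w)))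
    if pattern ≠ "" then pattern else PySem.Str.slice t0 none (some 100)

-- ===== PORT B =====
def find_common_pattern_py_alt (texts : List String) : String :=
  match texts with
  | [] => ""
  | t0 :: _ =>
    let pattern := PySem.Str.join " "
      ((PySem.Str.split₀ t0).filter (fun w =>
        texts.all (fun t => (PySem.Str.split₀ (PySem.Str.lower t)).contains (PySem.Str.lower w))))
    if pattern ≠ "" then pattern else PySem.Str.slice t0 none (some 100)

-- ===== PRECONDITION & SPEC =====
def Spec_find_common_pattern_py (texts : List String) (out : String) : Prop := out = find_common_pattern_py_alt texts
instance (texts : List String) (out : String) : Decidable (Spec_find_common_pattern_py texts out) := by unfold Spec_find_common_pattern_py; infer_instance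

-- ===== CLAIM (what is proved, stated in full; the proofs are below) =====
def Claim_equal_find_common_pattern_py : Prop := ∀ (texts : List String), Dom_find_common_pattern_py texts → Spec_find_common_pattern_py texts (find_common_pattern_py texts)

-- ===== LEMMAS AND PROOFS =====

-- membership in a left fold of set intersections
theorem mem_foldl_inter (l : List (PySem.Set String)) (s : PySem.Set String) (w : String) :
    w ∈ l.foldl (fun acc ws => PySem.Set.inter acc ws) s ↔ w ∈ s ∧ ∀ t ∈ l, w ∈ t := by
  induction l generalizing s with
  | nil => simp
  | cons h tl ih =>
    simp only [List.foldl_cons, ih, PySem.Set.mem_inter, List.mem_cons]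
    constructor
    · rintro ⟨⟨hs, hh⟩, htl⟩
      exact ⟨hs, fun t ht => ht.elim (fun e => e ▸ hh) (htl t)⟩
    · rintro ⟨hs, hall⟩
      exact ⟨⟨hs, hall h (Or.inl rfl)⟩, fun t ht => hall t (Or.inr ht)⟩

-- A's membership test over the intersection equals B's all-texts membership test
theorem key_pred (t0 : String) (rest : List String) (w : String) :
    PySem.Set.contains
        ((((t0 :: rest).map (fun t => PySem.Set.ofList (PySem.Str.split₀ (PySem.Str.lower t)))).drop 1).foldl
          (fun acc ws => PySem.Set.inter acc ws)
          (((t0 :: rest).map (fun t => PySem.Set.ofList (PySem.Str.split₀ (PySem.Str.lower t)))).headD PySem.Set.empty)) w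
      = (t0 :: rest).all (fun t => (PySem.Str.split₀ (PySem.Str.lower t)).contains w) := by
  set f : String → PySem.Set String := fun t => PySem.Set.ofList (PySem.Str.split₀ (PySem.Str.lower t)) with hf
  rcases hb : (t0 :: rest).all (fun t => (PySem.Str.split₀ (PySem.Str.lower t)).contains w) with _ | _
  · -- all = false: some text misses w
    rw [Bool.eq_false_iff]
    intro hc
    rw [PySem.Set.contains_iff] at hc
    simp only [List.map_cons, List.drop_succ_cons, List.drop_zero, List.headD_cons,
      mem_foldl_inter, List.mem_map] at hc
    obtain ⟨h0, hr⟩ := hc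
    have hall : ∀ t ∈ t0 :: rest, w ∈ PySem.Str.split₀ (PySem.Str.lower t) := by
      intro t ht
      rcases (List.mem_cons.mp ht) with rfl | ht
      · simpa [hf, PySem.Set.mem_ofList] using h0
      · have := hr (f t) ⟨t, ht, rfl⟩
        simpa [hf, PySem.Set.mem_ofList] using this
    rw [List.all_eq_false] at hb
    obtain ⟨t, ht, hnc⟩ := hb
    exact hnc (by simpa using hall t ht)
  · -- all = true: w is in every text's token list
    rw [List.all_eq_true] at hb
    rw [PySem.Set.contains_iff]
    simp only [List.map_cons, List.drop_succ_cons, List.drop_zero, List.headD_cons,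
      mem_foldl_inter, List.mem_map]
    refine ⟨?_, ?_⟩
    · have := hb t0 (List.mem_cons_self ..)
      simpa [hf, PySem.Set.mem_ofList] using this
    · rintro s ⟨t, ht, rfl⟩
      have := hb t (List.mem_cons_of_mem _ ht)
      simpa [hf, PySem.Set.mem_ofList] using this

-- ===== VERDICT (by name: the statement is the Claim_ definition above) =====
theorem find_common_pattern_py_spec : Claim_equal_find_common_pattern_py := by
  intro texts _
  unfold Spec_find_common_pattern_py find_common_pattern_py find_common_pattern_py_alt
  match texts with
  | [] => rfl
  | t0 :: rest =>
    simp only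
    have hp := funext (fun w => key_pred t0 rest (PySem.Str.lower w))
    rw [hp]
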